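-- pv_equiv track=rewrite | github.com/TheRealKoxno/zpdash | analyze_dumper.py | canonicalize_domain
-- ===== SOURCE A (Python) =====
-- from typing import Dict, Iterable, List, Optional, Set, Tuple
--
-- EXACT_DOMAIN_ALIASES = {
--     "ya.ru": "yandex.ru",
--     "yandex.com": "yandex.ru",
--     "twitter.com": "x.com",
--     "t.me": "telegram.org",
--     "web.telegram.org": "telegram.org",
--     "api.telegram.org": "telegram.org",
-- }
--
-- SUFFIX_CANONICAL_DOMAINS: List[Tuple[str, str]] = [
--     ("facebook.com", "facebook.com"),
--     ("instagram.com", "instagram.com"),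
--     ("telegram.org", "telegram.org"),
--     ("yandex.ru", "yandex.ru"),
--     ("x.com", "x.com"),
-- ]
--
-- def canonicalize_domain(host: str) -> str:
--     domain = (host or "").lower().strip(".")
--     if not domain:
--         return domain
--     domain = EXACT_DOMAIN_ALIASES.get(domain, domain)
--     for suffix, canonical in SUFFIX_CANONICAL_DOMAINS:
--         if domain == suffix or domain.endswith("." + suffix):
--             return canonical
--     return domain
-- ===== SOURCE B (Python) =====
-- from typing import Dict, List, Tuple
--
-- EXACT_DOMAIN_ALIASES = {
--     "ya.ru": "yandex.ru",
--     "yandex.com": "yandex.ru",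
--     "twitter.com": "x.com",
--     "t.me": "telegram.org",
--     "web.telegram.org": "telegram.org",
--     "api.telegram.org": "telegram.org",
-- }
--
-- # canonical value per suffix key, looked up directly
-- _CANON: Dict[str, str] = {
--     "facebook.com": "facebook.com",
--     "instagram.com": "instagram.com",
--     "telegram.org": "telegram.org",
--     "yandex.ru": "yandex.ru",
--     "x.com": "x.com",
-- }
--
--
-- def _walk(s: str, domain: str) -> str:
--     # walk the domain's own dot-aligned suffixes, longest first,
--     # by repeatedly cutting the text up to and including the first dot
--     hit = _CANON.get(s)
--     if hit is not None:
--         return hit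
--     dot = s.find(".")
--     if dot < 0:
--         return domain
--     return _walk(s[dot + 1:], domain)
--
--
-- def canonicalize_domain(host: str) -> str:
--     domain = host.lower().strip(".")
--     if not domain:
--         return domain
--     domain = EXACT_DOMAIN_ALIASES.get(domain, domain)
--     return _walk(domain, domain)
-- ===== Notes on version B (the rewrite author's own statement) =====
-- stated objective: alternative
-- what changed: Instead of scanning the fixed suffix list with ==/endswith per entry, B recursively walks the domain's own dot-aligned suffixes (cutting up to and including the first dot each step) and looks each suffix up in a dict keyed by suffix.
import Mathlib
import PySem

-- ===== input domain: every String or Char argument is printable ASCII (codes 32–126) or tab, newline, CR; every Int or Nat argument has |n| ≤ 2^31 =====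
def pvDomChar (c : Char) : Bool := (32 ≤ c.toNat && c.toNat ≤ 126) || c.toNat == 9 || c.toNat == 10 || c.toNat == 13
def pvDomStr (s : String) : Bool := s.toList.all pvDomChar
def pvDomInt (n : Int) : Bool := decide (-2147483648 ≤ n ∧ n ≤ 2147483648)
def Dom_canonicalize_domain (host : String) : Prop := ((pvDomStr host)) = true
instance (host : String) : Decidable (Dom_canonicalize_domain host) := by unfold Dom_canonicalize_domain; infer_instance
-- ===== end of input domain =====

-- B canonicalizes by recursively walking the domain's own dot-aligned suffixes (cutting up to
-- and including the first dot each step) with a dict lookup per suffix, instead of A's scan of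
-- the fixed suffix list with ==/endswith per entry.

-- ===== PORT A =====
def EXACT_DOMAIN_ALIASES : PySem.Dict String String :=
  PySem.Dict.ofList
    [("ya.ru", "yandex.ru"), ("yandex.com", "yandex.ru"), ("twitter.com", "x.com"),
     ("t.me", "telegram.org"), ("web.telegram.org", "telegram.org"),
     ("api.telegram.org", "telegram.org")]

def SUFFIX_CANONICAL_DOMAINS : List (String × String) :=
  [("facebook.com", "facebook.com"), ("instagram.com", "instagram.com"),
   ("telegram.org", "telegram.org"), ("yandex.ru", "yandex.ru"), ("x.com", "x.com")]

-- the 'for suffix, canonical in SUFFIX_CANONICAL_DOMAINS' loop of A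
def canonSuffixLoop : List (String × String) → String → String
  | [], domain => domain
  | (suffix, canonical) :: rest, domain =>
      if domain == suffix || PySem.Str.endswith domain ("." ++ suffix) then canonical
      else canonSuffixLoop rest domain

def canonicalize_domain (host : String) : String :=
  let h := if host == "" then "" else host          -- (host or "")
  let domain := PySem.Str.stripChars (PySem.Str.lower h) "."
  if domain == "" then domain
  else
    let domain2 := (EXACT_DOMAIN_ALIASES.get? domain).getD domain
    canonSuffixLoop SUFFIX_CANONICAL_DOMAINS domain2

-- ===== PORT B =====
def B_EXACT_ALIASES : PySem.Dict String String :=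
  PySem.Dict.ofList
    [("ya.ru", "yandex.ru"), ("yandex.com", "yandex.ru"), ("twitter.com", "x.com"),
     ("t.me", "telegram.org"), ("web.telegram.org", "telegram.org"),
     ("api.telegram.org", "telegram.org")]

def B_CANON : PySem.Dict String String :=
  PySem.Dict.ofList
    [("facebook.com", "facebook.com"), ("instagram.com", "instagram.com"),
     ("telegram.org", "telegram.org"), ("yandex.ru", "yandex.ru"), ("x.com", "x.com")]

-- Source B's recursive _walk; its string argument s is carried as its char list (exact)
def bWalk (s : List Char) (domain : String) : String :=
  match B_CANON.get? (String.ofList s) with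
  | some hit => hit
  | none =>
      if h : PySem.Chars.find s ['.'] < 0 then domain
      else bWalk (PySem.List.slice s (some (PySem.Chars.find s ['.'] + 1)) none) domain
termination_by s.length
decreasing_by
  have h0 : (0 : Int) ≤ PySem.Chars.find s ['.'] := by omega
  have hsp := (PySem.Chars.find_spec (s := s) (sub := ['.']) h0).1
  obtain ⟨t, ht⟩ := hsp
  have hlen : (PySem.Chars.find s ['.']).toNat < s.length := by
    have := congrArg List.length ht
    simp [List.length_drop] at this
    omega
  rw [PySem.List.slice_from s (by omega : (0:Int) ≤ PySem.Chars.find s ['.'] + 1)]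
  simp only [List.length_drop]
  omega

def canonicalize_domain_alt (host : String) : String :=
  let domain := PySem.Str.stripChars (PySem.Str.lower host) "."
  if domain == "" then domain
  else
    let domain2 := (B_EXACT_ALIASES.get? domain).getD domain
    bWalk domain2.toList domain2

-- ===== PRECONDITION & SPEC =====
def Spec_canonicalize_domain (host : String) (out : String) : Prop := out = canonicalize_domain_alt host
instance (host : String) (out : String) : Decidable (Spec_canonicalize_domain host out) := by unfold Spec_canonicalize_domain; infer_instance

-- ===== CLAIM (what is proved, stated in full; the proofs are below) =====
def Claim_equal_canonicalize_domain : Prop := ∀ (host : String), Dom_canonicalize_domain host → Spec_canonicalize_domain host (canonicalize_domain host)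

-- ===== LEMMAS AND PROOFS =====

-- 'p matches d' in A's sense: d == p or d endswith '.'+p, stated on char lists
def MatchP (K d : String) : Prop := d = K ∨ ('.' :: K.toList) <:+ d.toList

theorem condA_iff (K d : String) :
    (d == K || PySem.Str.endswith d ("." ++ K)) = true ↔ MatchP K d := by
  rw [MatchP, Bool.or_eq_true, beq_iff_eq, PySem.Str.endswith_eq, PySem.Chars.endswith_iff,
      String.toList_append]
  rfl

theorem canonSuffixLoop_none (l : List (String × String)) (d : String)
    (H : ∀ p ∈ l, ¬ MatchP p.1 d) :
    canonSuffixLoop l d = d := by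
  induction l with
  | nil => rfl
  | cons p rest ih =>
    obtain ⟨suffix, canonical⟩ := p
    rw [canonSuffixLoop, if_neg]
    · exact ih (fun q hq => H q (by simp [hq]))
    · intro hc
      exact H (suffix, canonical) (by simp) ((condA_iff suffix d).mp hc)

theorem canonSuffixLoop_found (l : List (String × String)) (d suf canon : String)
    (Hm : (suf, canon) ∈ l) (Hmatch : MatchP suf d)
    (Huniq : ∀ p ∈ l, MatchP p.1 d → p = (suf, canon)) :
    canonSuffixLoop l d = canon := by
  induction l with
  | nil => simp at Hm
  | cons p rest ih =>
    obtain ⟨s, cn⟩ := p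
    rw [canonSuffixLoop]
    by_cases hp : MatchP s d
    · have := Huniq (s, cn) (by simp) hp
      rw [if_pos ((condA_iff s d).mpr hp)]
      exact congrArg Prod.snd this
    · rw [if_neg (fun hc => hp ((condA_iff s d).mp hc))]
      have hmem : (suf, canon) ∈ rest := by
        rcases List.mem_cons.mp Hm with h | h
        · injection h with h1 h2; subst h1; exact absurd Hmatch hp
        · exact h
      exact ih hmem (fun q hq hqm => Huniq q (by simp [hq]) hqm)

-- closed-form evaluation of B's suffix dict
theorem bcanon_get?_eq (c : String) :
    B_CANON.get? c =
      if c = "facebook.com" then some "facebook.com"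
      else if c = "instagram.com" then some "instagram.com"
      else if c = "telegram.org" then some "telegram.org"
      else if c = "yandex.ru" then some "yandex.ru"
      else if c = "x.com" then some "x.com"
      else none := by
  have hitems : B_CANON.items =
      [("facebook.com", "facebook.com"), ("instagram.com", "instagram.com"),
       ("telegram.org", "telegram.org"), ("yandex.ru", "yandex.ru"), ("x.com", "x.com")] := by
    decide
  split_ifs with h1 h2 h3 h4 h5
  · subst h1; decide
  · subst h2; decide
  · subst h3; decide
  · subst h4; decide
  · subst h5; decide
  · simp [PySem.Dict.get?, hitems, List.find?, beq_eq_false_iff_ne.mpr (Ne.symm h1),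
      beq_eq_false_iff_ne.mpr (Ne.symm h2), beq_eq_false_iff_ne.mpr (Ne.symm h3),
      beq_eq_false_iff_ne.mpr (Ne.symm h4), beq_eq_false_iff_ne.mpr (Ne.symm h5)]

-- get? hits exactly the table entries
theorem bcanon_get?_some (c v : String) (h : B_CANON.get? c = some v) :
    (c, v) ∈ SUFFIX_CANONICAL_DOMAINS := by
  rw [bcanon_get?_eq] at h
  split_ifs at h <;> simp_all [SUFFIX_CANONICAL_DOMAINS]

theorem bcanon_get?_key (suf canon : String) (Hm : (suf, canon) ∈ SUFFIX_CANONICAL_DOMAINS) :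
    B_CANON.get? suf = some canon := by
  simp only [SUFFIX_CANONICAL_DOMAINS, List.mem_cons, List.not_mem_nil, or_false] at Hm
  rcases Hm with h | h | h | h | h <;> (injection h with h1 h2; subst h1; subst h2; decide)

-- at most one table entry matches a given d (keys are distinct and never dot-suffixes of one another)
theorem matchP_unique (d : String) :
    ∀ p ∈ SUFFIX_CANONICAL_DOMAINS, ∀ q ∈ SUFFIX_CANONICAL_DOMAINS,
      MatchP p.1 d → MatchP q.1 d → p = q := by
  have hkey : ∀ p ∈ SUFFIX_CANONICAL_DOMAINS, ∀ q ∈ SUFFIX_CANONICAL_DOMAINS,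
      p.1 = q.1 → p = q := by decide
  have hnosub : ∀ p ∈ SUFFIX_CANONICAL_DOMAINS, ∀ q ∈ SUFFIX_CANONICAL_DOMAINS,
      ¬ ('.' :: p.1.toList <:+ q.1.toList) := by decide
  intro p hp q hq hpm hqm
  rcases hpm with h1 | h1 <;> rcases hqm with h2 | h2
  · exact hkey p hp q hq (h1 ▸ h2 ▸ rfl)
  · subst h1
    exact absurd h2 (hnosub q hq p hp)
  · subst h2
    exact absurd h1 (hnosub p hp q hq)
  · rcases List.suffix_or_suffix_of_suffix h1 h2 with h | h
    · rcases List.suffix_cons_iff.mp h with h' | h'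
      · have : p.1.toList = q.1.toList := by injection h'
        exact hkey p hp q hq (String.toList_inj.mp this)
      · exact absurd h' (hnosub p hp q hq)
    · rcases List.suffix_cons_iff.mp h with h' | h'
      · have : q.1.toList = p.1.toList := by injection h'
        exact (hkey p hp q hq (String.toList_inj.mp this.symm))
      · exact absurd h' (hnosub q hq p hp)

-- a walk state: the full domain, or a dot-preceded suffix of it
def AlignedS (s : List Char) (d : String) : Prop := s = d.toList ∨ ('.' :: s) <:+ d.toList

theorem aligned_suffix {s : List Char} {d : String} (h : AlignedS s d) : s <:+ d.toList := by
  rcases h with h | h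
  · exact h ▸ List.suffix_refl _
  · exact (List.suffix_cons '.' s).trans h

theorem aligned_key {s : List Char} {d K : String} (ha : AlignedS s d)
    (h : String.ofList s = K) : MatchP K d := by
  have hK : K.toList = s := by rw [← h, String.toList_ofList]
  rcases ha with h' | h'
  · exact Or.inl (String.toList_inj.mp (h' ▸ hK)).symm
  · exact Or.inr (hK ▸ h')

-- the cut step: with f = first dot index, s.drop (f+1) is the suffix right after the first dot
theorem find_drop_cons (s : List Char) (h0 : 0 ≤ PySem.Chars.find s ['.']) :
    s.drop (PySem.Chars.find s ['.']).toNat =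
      '.' :: s.drop ((PySem.Chars.find s ['.']).toNat + 1) := by
  obtain ⟨t, ht⟩ := (PySem.Chars.find_spec (s := s) (sub := ['.']) h0).1
  have htail : t = s.drop ((PySem.Chars.find s ['.']).toNat + 1) := by
    have h1 : (['.'] ++ t).tail = t := rfl
    rw [ht, List.tail_drop] at h1
    exact h1.symm
  rw [← ht, htail]
  rfl

theorem step_suffix (s : List Char) (h0 : 0 ≤ PySem.Chars.find s ['.']) :
    ('.' :: s.drop ((PySem.Chars.find s ['.']).toNat + 1)) <:+ s := by
  rw [← find_drop_cons s h0]
  exact List.drop_suffix _ _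

-- maximality: every dot-preceded suffix of s survives the cut (or is exactly the cut)
theorem step_max (s t : List Char) (h0 : 0 ≤ PySem.Chars.find s ['.'])
    (h : ('.' :: t) <:+ s) :
    ('.' :: t) <:+ ('.' :: s.drop ((PySem.Chars.find s ['.']).toNat + 1)) := by
  obtain ⟨pre, hpre⟩ := h
  have hdropP : s.drop pre.length = '.' :: t := by
    rw [← hpre, List.drop_left]
  have hfle : (PySem.Chars.find s ['.']).toNat ≤ pre.length := by
    by_contra hlt
    push Not at hlt
    exact ((PySem.Chars.find_spec (s := s) (sub := ['.']) h0).2 pre.length hlt)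
      ⟨t, hdropP.symm⟩
  rw [← find_drop_cons s h0]
  have h1 : ('.' :: t) <:+ s := ⟨pre, hpre⟩
  have h2 : s.drop (PySem.Chars.find s ['.']).toNat <:+ s := List.drop_suffix _ _
  rcases List.suffix_or_suffix_of_suffix h1 h2 with h | h
  · exact h
  · have hs : s.length = pre.length + (t.length + 1) := by
      have := congrArg List.length hpre
      simp at this
      omega
    have heq : (s.drop (PySem.Chars.find s ['.']).toNat).length = ('.' :: t).length := by
      have hle1 := h.length_le
      have hl : (s.drop (PySem.Chars.find s ['.']).toNat).length =
          s.length - (PySem.Chars.find s ['.']).toNat := List.length_drop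
      simp only [List.length_cons] at hle1 ⊢
      omega
    rw [List.IsSuffix.eq_of_length h heq]

theorem no_dot_no_suffix (s t : List Char) (h0 : PySem.Chars.find s ['.'] < 0)
    (h : ('.' :: t) <:+ s) : False := by
  have hne : PySem.Chars.find s ['.'] = -1 := by
    have := PySem.Chars.neg_one_le_find s ['.']
    omega
  have hnin := (PySem.Chars.find_eq_neg_one_iff s ['.']).mp hne
  have hinf : ['.'] <:+: ('.' :: t) := ⟨[], t, rfl⟩
  exact hnin (hinf.trans h.isInfix)

-- one unfolding step of bWalk in the no-hit, dot-found case, stated on drop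
theorem bWalk_step (s : List Char) (d : String)
    (hget : B_CANON.get? (String.ofList s) = none)
    (hlt : ¬ PySem.Chars.find s ['.'] < 0) :
    bWalk s d = bWalk (s.drop ((PySem.Chars.find s ['.']).toNat + 1)) d := by
  rw [bWalk, hget]
  dsimp only
  rw [dif_neg hlt]
  congr 1
  rw [PySem.List.slice_from s (by omega : (0:Int) ≤ PySem.Chars.find s ['.'] + 1)]
  congr 1
  omega

-- B's walk returns domain when no table entry matches d
theorem bWalk_none (n : Nat) : ∀ (s : List Char), s.length ≤ n → ∀ (d : String),
    AlignedS s d → (∀ p ∈ SUFFIX_CANONICAL_DOMAINS, ¬ MatchP p.1 d) →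
    bWalk s d = d := by
  induction n with
  | zero =>
    intro s hsn d _ _
    have hs : s = [] := List.eq_nil_of_length_eq_zero (Nat.le_zero.mp hsn)
    subst hs
    rw [bWalk, show B_CANON.get? (String.ofList ([] : List Char)) = none from by decide]
    dsimp only
    rw [dif_pos (by decide : PySem.Chars.find ([] : List Char) ['.'] < 0)]
  | succ n ih =>
    intro s hsn d ha H
    cases hget : B_CANON.get? (String.ofList s) with
    | some hit =>
      exact absurd (aligned_key ha rfl) (H _ (bcanon_get?_some _ _ hget))
    | none =>
      by_cases hlt : PySem.Chars.find s ['.'] < 0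
      · rw [bWalk, hget]
        dsimp only
        rw [dif_pos hlt]
      · rw [bWalk_step s d hget hlt]
        have h0 : (0 : Int) ≤ PySem.Chars.find s ['.'] := by omega
        have hsuf : ('.' :: s.drop ((PySem.Chars.find s ['.']).toNat + 1)) <:+ d.toList :=
          (step_suffix s h0).trans (aligned_suffix ha)
        have hlen : (s.drop ((PySem.Chars.find s ['.']).toNat + 1)).length ≤ n := by
          obtain ⟨t, ht⟩ := (PySem.Chars.find_spec (s := s) (sub := ['.']) h0).1
          have := congrArg List.length ht
          simp at this
          simp only [List.length_drop]
          omega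
        exact ih _ hlen d (Or.inr hsuf) H

-- B's walk returns the canonical of the unique matching entry
theorem bWalk_found (n : Nat) : ∀ (s : List Char), s.length ≤ n → ∀ (d K c : String),
    AlignedS s d → (s = K.toList ∨ ('.' :: K.toList) <:+ s) →
    B_CANON.get? K = some c →
    (∀ p ∈ SUFFIX_CANONICAL_DOMAINS, MatchP p.1 d → p = (K, c)) →
    bWalk s d = c := by
  induction n with
  | zero =>
    intro s hsn d K c _ hreach hget _
    have hs : s = [] := List.eq_nil_of_length_eq_zero (Nat.le_zero.mp hsn)
    subst hs
    rcases hreach with h | h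
    · rw [bWalk]
      rw [show String.ofList ([] : List Char) = K from
        String.toList_inj.mp (by rw [String.toList_ofList, h])]
      rw [hget]
    · exact absurd h (by simp)
  | succ n ih =>
    intro s hsn d K c ha hreach hget Huniq
    cases hgets : B_CANON.get? (String.ofList s) with
    | some hit =>
      have hmem := bcanon_get?_some _ _ hgets
      have hmatch : MatchP (String.ofList s) d := aligned_key ha rfl
      have := Huniq _ hmem hmatch
      have hc : hit = c := congrArg Prod.snd this
      rw [bWalk, hgets, hc]
    | none =>
      have hne : ¬ s = K.toList := by
        intro h
        rw [show String.ofList s = K from String.toList_inj.mp (by rw [String.toList_ofList, h]),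
          hget] at hgets
        simp at hgets
      have hKs : ('.' :: K.toList) <:+ s := hreach.resolve_left hne
      by_cases hlt : PySem.Chars.find s ['.'] < 0
      · exact absurd hKs (fun h => no_dot_no_suffix s K.toList hlt h)
      · rw [bWalk_step s d hgets hlt]
        have h0 : (0 : Int) ≤ PySem.Chars.find s ['.'] := by omega
        have hsuf : ('.' :: s.drop ((PySem.Chars.find s ['.']).toNat + 1)) <:+ d.toList :=
          (step_suffix s h0).trans (aligned_suffix ha)
        have hlen : (s.drop ((PySem.Chars.find s ['.']).toNat + 1)).length ≤ n := by
          obtain ⟨t, ht⟩ := (PySem.Chars.find_spec (s := s) (sub := ['.']) h0).1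
          have := congrArg List.length ht
          simp at this
          simp only [List.length_drop]
          omega
        have hreach' : s.drop ((PySem.Chars.find s ['.']).toNat + 1) = K.toList ∨
            ('.' :: K.toList) <:+ s.drop ((PySem.Chars.find s ['.']).toNat + 1) := by
          rcases List.suffix_cons_iff.mp (step_max s K.toList h0 hKs) with h' | h'
          · left
            have := congrArg List.tail h'
            simpa using this.symm
          · right; exact h'
        exact ih _ hlen d K c (Or.inr hsuf) hreach' hget Huniq

-- the two post-alias stages agree on every domain string
theorem loops_eq (d : String) :
    canonSuffixLoop SUFFIX_CANONICAL_DOMAINS d = bWalk d.toList d := by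
  by_cases hex : ∃ p ∈ SUFFIX_CANONICAL_DOMAINS, MatchP p.1 d
  · obtain ⟨⟨K, c⟩, hm, hmatch⟩ := hex
    have huniq : ∀ p ∈ SUFFIX_CANONICAL_DOMAINS, MatchP p.1 d → p = (K, c) :=
      fun p hp hpm => matchP_unique d p hp (K, c) hm hpm hmatch
    rw [canonSuffixLoop_found _ d K c hm hmatch huniq]
    have hreach : d.toList = K.toList ∨ ('.' :: K.toList) <:+ d.toList := by
      rcases hmatch with h | h
      · exact Or.inl (by rw [h])
      · exact Or.inr h
    exact (bWalk_found d.toList.length d.toList le_rfl d K c (Or.inl rfl) hreach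
      (bcanon_get?_key K c hm) huniq).symm
  · push Not at hex
    rw [canonSuffixLoop_none _ d hex,
      bWalk_none d.toList.length d.toList le_rfl d (Or.inl rfl) hex]

-- ===== VERDICT (by name: the statement is the Claim_ definition above) =====
theorem canonicalize_domain_spec : Claim_equal_canonicalize_domain := by
  intro host _
  unfold Spec_canonicalize_domain canonicalize_domain canonicalize_domain_alt
  have hhost : (if host == "" then "" else host) = host := by
    by_cases h : host = "" <;> simp [h]
  rw [hhost]
  by_cases h : (PySem.Str.stripChars (PySem.Str.lower host) "." == "") = true
  · simp only [h, if_pos]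
  · simp only [Bool.not_eq_true] at h
    simp only [h, Bool.false_eq_true, if_false]
    have : B_EXACT_ALIASES = EXACT_DOMAIN_ALIASES := rfl
    rw [this]
    exact loops_eq _
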